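-- pv_equiv track=rewrite | github.com/LA3D/Cogitarelink | cogitarelink/cli/cl_describe.py | _determine_entity_type
-- ===== SOURCE A (Python) =====
-- from typing import Optional, List, Dict, Any, Union
--
-- def _determine_entity_type(entity_data: Dict[str, Any]) -> str:
--     """Determine appropriate @type for entity based on characteristics."""
--
--     entity_types = entity_data.get("entity_types", [])
--
--     # Person
--     if "Q5" in entity_types:
--         return "Person"
--
--     # Biological entities
--     if "Q8054" in entity_types:  # protein
--         return "Protein"
--     elif "Q7187" in entity_types:  # gene
--         return "Gene"
--     elif "Q11173" in entity_types:  # chemical compound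
--         return "ChemicalSubstance"
--
--     # Geographic entities
--     if "Q515" in entity_types:  # city
--         return "City"
--     elif "Q6256" in entity_types:  # country
--         return "Country"
--     elif "Q35657" in entity_types:  # state
--         return "State"
--
--     # Organization
--     if any(t in ["Q43229", "Q4830453"] for t in entity_types):  # organization, business
--         return "Organization"
--
--     return "Thing"  # Default
-- ===== SOURCE B (Python) =====
-- _RANK = {"Q5": 0, "Q8054": 1, "Q7187": 2, "Q11173": 3,
--          "Q515": 4, "Q6256": 5, "Q35657": 6, "Q43229": 7, "Q4830453": 7}
-- _NAMES = ["Person", "Protein", "Gene", "ChemicalSubstance",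
--           "City", "Country", "State", "Organization"]
--
-- def _determine_entity_type(entity_data):
--     """Determine appropriate @type for entity based on characteristics."""
--     entity_types = entity_data.get("entity_types", [])
--     best = 8
--     for t in entity_types:
--         best = min(best, _RANK.get(t, 8))
--     return _NAMES[best] if best < 8 else "Thing"
-- ===== Notes on version B (the rewrite author's own statement) =====
-- stated objective: alternative
-- what changed: Instead of nine ordered membership scans over entity_types, B makes a single pass over entity_types keeping the minimum priority rank from a code-to-rank dict, then indexes a name table by that rank.
import Mathlib
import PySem

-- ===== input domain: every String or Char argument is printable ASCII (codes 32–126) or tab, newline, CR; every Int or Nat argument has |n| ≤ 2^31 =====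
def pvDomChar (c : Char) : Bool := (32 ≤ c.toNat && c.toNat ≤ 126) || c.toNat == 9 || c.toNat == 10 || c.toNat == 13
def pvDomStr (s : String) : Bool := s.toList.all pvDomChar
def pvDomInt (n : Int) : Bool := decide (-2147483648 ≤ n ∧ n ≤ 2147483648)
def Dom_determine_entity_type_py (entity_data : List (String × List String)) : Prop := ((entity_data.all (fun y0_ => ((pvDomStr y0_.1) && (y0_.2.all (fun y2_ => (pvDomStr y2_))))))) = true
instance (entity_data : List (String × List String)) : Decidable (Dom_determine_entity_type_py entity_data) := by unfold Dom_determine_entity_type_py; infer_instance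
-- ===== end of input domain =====

-- One honest line: B replaces A's nine ordered membership scans of entity_types by a single
-- pass over entity_types keeping the minimum priority rank (code→rank dict), then indexes a
-- name table by that rank (alternative decomposition, same observable result).

-- ===== PORT A =====
def determine_entity_type_py (entity_data : List (String × List String)) : String :=
  let entity_types := (PySem.Dict.get? (PySem.Dict.mk entity_data) "entity_types").getD []
  if entity_types.contains "Q5" then "Person"
  else if entity_types.contains "Q8054" then "Protein"
  else if entity_types.contains "Q7187" then "Gene"
  else if entity_types.contains "Q11173" then "ChemicalSubstance"
  else if entity_types.contains "Q515" then "City"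
  else if entity_types.contains "Q6256" then "Country"
  else if entity_types.contains "Q35657" then "State"
  else if entity_types.any (fun t => (["Q43229", "Q4830453"] : List String).contains t) then "Organization"
  else "Thing"

-- ===== PORT B =====
-- the _RANK dict literal (unique keys)
def pvRank : PySem.Dict String Nat :=
  PySem.Dict.mk [("Q5", 0), ("Q8054", 1), ("Q7187", 2), ("Q11173", 3),
                 ("Q515", 4), ("Q6256", 5), ("Q35657", 6), ("Q43229", 7), ("Q4830453", 7)]

-- the _NAMES list literal
def pvNames : List String :=
  ["Person", "Protein", "Gene", "ChemicalSubstance", "City", "Country", "State", "Organization"]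

def determine_entity_type_py_alt (entity_data : List (String × List String)) : String :=
  let entity_types := (PySem.Dict.get? (PySem.Dict.mk entity_data) "entity_types").getD []
  -- 'best = 8; for t in entity_types: best = min(best, _RANK.get(t, 8))'
  let best := entity_types.foldl (fun b t => min b (PySem.Dict.getD pvRank t 8)) 8
  -- '_NAMES[best] if best < 8 else "Thing"' (best < 8 keeps the index in range)
  if best < 8 then pvNames.getD best "Thing" else "Thing"

-- ===== PRECONDITION & SPEC =====
def Spec_determine_entity_type_py (entity_data : List (String × List String)) (out : String) : Prop := out = determine_entity_type_py_alt entity_data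
instance (entity_data : List (String × List String)) (out : String) : Decidable (Spec_determine_entity_type_py entity_data out) := by unfold Spec_determine_entity_type_py; infer_instance

-- ===== CLAIM (what is proved, stated in full; the proofs are below) =====
def Claim_equal_determine_entity_type_py : Prop := ∀ (entity_data : List (String × List String)), Dom_determine_entity_type_py entity_data → Spec_determine_entity_type_py entity_data (determine_entity_type_py entity_data)

-- ===== LEMMAS AND PROOFS =====

-- the rank B assigns to one entity-type string
def pvR (t : String) : Nat := PySem.Dict.getD pvRank t 8

-- B's one-pass minimum rank
def pvM (ts : List String) : Nat := ts.foldl (fun b t => min b (pvR t)) 8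

-- closed form of pvR as an if-chain on the nine codes
theorem pvR_spec (t : String) :
    pvR t = if "Q5" = t then 0 else if "Q8054" = t then 1 else if "Q7187" = t then 2
      else if "Q11173" = t then 3 else if "Q515" = t then 4 else if "Q6256" = t then 5
      else if "Q35657" = t then 6 else if "Q43229" = t then 7 else if "Q4830453" = t then 7
      else 8 := by
  simp only [pvR, pvRank, PySem.Dict.getD, PySem.Dict.get?_mk_cons, beq_iff_eq]
  split_ifs with h1 h2 h3 h4 h5 h6 h7 h8 h9 <;> simp [PySem.Dict.get?]

-- folding B's min loop from any accumulator splits off the accumulator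
theorem pvFoldl_min (ts : List String) (b c : Nat) :
    ts.foldl (fun b t => min b (pvR t)) (min b c) = min b (ts.foldl (fun b t => min b (pvR t)) c) := by
  induction ts generalizing c with
  | nil => rfl
  | cons t ts ih => simp only [List.foldl_cons, min_assoc, ih]

theorem pvM_cons (t : String) (ts : List String) : pvM (t :: ts) = min (pvR t) (pvM ts) := by
  have h : pvM (t :: ts) = ts.foldl (fun b t => min b (pvR t)) (min (pvR t) 8) := by
    simp [pvM, min_comm]
  rw [h, pvFoldl_min]; rfl

-- the minimum rank equals the rank picked by A's precedence chain of contains-tests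
set_option maxHeartbeats 4000000 in
theorem pvM_chain (ts : List String) :
    pvM ts = (if ts.contains "Q5" then 0 else if ts.contains "Q8054" then 1
      else if ts.contains "Q7187" then 2 else if ts.contains "Q11173" then 3
      else if ts.contains "Q515" then 4 else if ts.contains "Q6256" then 5
      else if ts.contains "Q35657" then 6
      else if ts.contains "Q43229" || ts.contains "Q4830453" then 7 else 8) := by
  induction ts with
  | nil => rfl
  | cons t ts ih =>
      rw [pvM_cons, ih, pvR_spec]
      simp only [List.contains_cons]
      by_cases h1 : "Q5" = t
      · subst h1
        simp only [String.reduceEq, String.reduceBEq, reduceIte, Bool.false_or, Bool.true_or,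
          Bool.or_true, beq_self_eq_true]
        split_ifs <;> omega
      by_cases h2 : "Q8054" = t
      · subst h2
        simp only [String.reduceEq, String.reduceBEq, reduceIte, Bool.false_or, Bool.true_or,
          Bool.or_true, beq_self_eq_true, if_true]
        split_ifs <;> omega
      by_cases h3 : "Q7187" = t
      · subst h3
        simp only [String.reduceEq, String.reduceBEq, reduceIte, Bool.false_or, Bool.true_or,
          Bool.or_true, beq_self_eq_true, if_true]
        split_ifs <;> omega
      by_cases h4 : "Q11173" = t
      · subst h4
        simp only [String.reduceEq, String.reduceBEq, reduceIte, Bool.false_or, Bool.true_or,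
          Bool.or_true, beq_self_eq_true, if_true]
        split_ifs <;> omega
      by_cases h5 : "Q515" = t
      · subst h5
        simp only [String.reduceEq, String.reduceBEq, reduceIte, Bool.false_or, Bool.true_or,
          Bool.or_true, beq_self_eq_true, if_true]
        split_ifs <;> omega
      by_cases h6 : "Q6256" = t
      · subst h6
        simp only [String.reduceEq, String.reduceBEq, reduceIte, Bool.false_or, Bool.true_or,
          Bool.or_true, beq_self_eq_true, if_true]
        split_ifs <;> omega
      by_cases h7 : "Q35657" = t
      · subst h7
        simp only [String.reduceEq, String.reduceBEq, reduceIte, Bool.false_or, Bool.true_or,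
          Bool.or_true, beq_self_eq_true, if_true]
        split_ifs <;> omega
      by_cases h8 : "Q43229" = t
      · subst h8
        simp only [String.reduceEq, String.reduceBEq, reduceIte, Bool.false_or, Bool.true_or,
          Bool.or_true, beq_self_eq_true, if_true]
        split_ifs <;> omega
      by_cases h9 : "Q4830453" = t
      · subst h9
        simp only [String.reduceEq, String.reduceBEq, reduceIte, Bool.false_or, Bool.true_or,
          Bool.or_true, beq_self_eq_true, if_true]
        split_ifs <;> omega
      have e1 : (("Q5" : String) == t) = false := by simpa using h1
      have e2 : (("Q8054" : String) == t) = false := by simpa using h2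
      have e3 : (("Q7187" : String) == t) = false := by simpa using h3
      have e4 : (("Q11173" : String) == t) = false := by simpa using h4
      have e5 : (("Q515" : String) == t) = false := by simpa using h5
      have e6 : (("Q6256" : String) == t) = false := by simpa using h6
      have e7 : (("Q35657" : String) == t) = false := by simpa using h7
      have e8 : (("Q43229" : String) == t) = false := by simpa using h8
      have e9 : (("Q4830453" : String) == t) = false := by simpa using h9
      simp only [if_neg h1, if_neg h2, if_neg h3, if_neg h4, if_neg h5, if_neg h6,
        if_neg h7, if_neg h8, if_neg h9, e1, e2, e3, e4, e5, e6, e7, e8, e9, Bool.false_or]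
      split_ifs <;> omega

-- A's final 'any t in [...]' test is the disjunction of two membership tests
theorem pvOrg_any (ts : List String) :
    (ts.any fun t => (["Q43229", "Q4830453"] : List String).contains t)
      = (ts.contains "Q43229" || ts.contains "Q4830453") := by
  rw [Bool.eq_iff_iff]
  simp [List.contains_eq_mem, List.any_eq_true]
  aesop

-- A's chain and B's rank-indexed lookup agree on every list of entity types
theorem pvCore (ts : List String) :
    (if ts.contains "Q5" then "Person"
     else if ts.contains "Q8054" then "Protein"
     else if ts.contains "Q7187" then "Gene"
     else if ts.contains "Q11173" then "ChemicalSubstance"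
     else if ts.contains "Q515" then "City"
     else if ts.contains "Q6256" then "Country"
     else if ts.contains "Q35657" then "State"
     else if ts.any (fun t => (["Q43229", "Q4830453"] : List String).contains t) then "Organization"
     else "Thing")
      = (if pvM ts < 8 then pvNames.getD (pvM ts) "Thing" else "Thing") := by
  rw [pvOrg_any, pvM_chain]
  split_ifs <;> simp_all [pvNames]

-- ===== VERDICT (by name: the statement is the Claim_ definition above) =====
theorem determine_entity_type_py_spec : Claim_equal_determine_entity_type_py := by
  intro entity_data _
  unfold Spec_determine_entity_type_py determine_entity_type_py determine_entity_type_py_alt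
  exact pvCore _
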